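-- pv_equiv track=rewrite | github.com/ninepig/leecode_dd_2024 | company/zAmazon/oa/zmethodExplained/countMaxProfitableStocks.py | countMaxGroup
-- ===== SOURCE A (Python) =====
-- def countMaxGroup(stockList:list[int])->int:
--     count = 0
--
--     for i in range(len(stockList)):
--         start = stockList[i]
--         max = start
--         count += 1
--         for j in range(i+1,len(stockList)):
--             end = stockList[j]
--             if end > max :
--                 max = end
--                 count += 1
--             elif start == max:
--                 count += 1
--
--     return count
-- ===== SOURCE B (Python) =====
-- def countMaxGroup(stockList: list[int]) -> int:
--     # One right-to-left pass with a monotonic stack of (value, distance-from-right-end).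
--     # For each start s at distance d: contribution = 1 + (#records after s) + (#elements before first record).
--     # After popping values <= s, the stack is exactly the record chain of the suffix:
--     # its length is the record count, its top's distance locates the first record.
--     total = 0
--     stack = []  # (value, distance from right end), values strictly increasing towards the bottom
--     d = 0
--     for v in reversed(stockList):
--         while stack and stack[-1][0] <= v:
--             stack.pop()
--         if stack:
--             total += len(stack) + d - stack[-1][1]
--         else:
--             total += d + 1
--         stack.append((v, d))
--         d += 1
--     return total
-- ===== Notes on version B (the rewrite author's own statement) =====
-- stated objective: faster
-- what changed: Replaces A's per-start rescan of the whole suffix (nested loops) with a single right-to-left monotonic-stack pass: after popping values <= the current element, the stack is exactly the record chain of the suffix, so its length gives the record count and its top's position locates the first record.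
import Mathlib
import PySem

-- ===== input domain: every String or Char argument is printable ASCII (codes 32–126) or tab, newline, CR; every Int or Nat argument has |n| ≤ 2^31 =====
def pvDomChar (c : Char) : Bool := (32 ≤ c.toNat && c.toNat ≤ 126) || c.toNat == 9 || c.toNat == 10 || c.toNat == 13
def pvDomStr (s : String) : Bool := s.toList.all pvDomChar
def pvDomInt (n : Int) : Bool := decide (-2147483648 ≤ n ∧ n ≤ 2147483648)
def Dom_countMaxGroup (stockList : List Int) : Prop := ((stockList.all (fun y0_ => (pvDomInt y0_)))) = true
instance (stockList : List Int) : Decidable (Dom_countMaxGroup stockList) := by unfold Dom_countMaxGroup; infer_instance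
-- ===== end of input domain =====

-- B replaces A's quadratic start-by-start rescan with one right-to-left monotonic-stack pass (objective: faster, O(n^2) → O(n)).

-- ===== PORT A =====
-- body of A's inner loop: running max mc.1, count mc.2, next element e
def stepA (start : Int) (mc : Int × Int) (e : Int) : Int × Int :=
  if mc.1 < e then (e, mc.2 + 1)
  else if start = mc.1 then (mc.1, mc.2 + 1)
  else mc

def countMaxGroup (stockList : List Int) : Int :=
  (PySem.List.pyRange 0 (stockList.length : Int) 1).foldl (fun count i =>
    let start := PySem.List.pyGetD stockList i 0
    ((PySem.List.pyRange (i + 1) (stockList.length : Int) 1).foldl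
      (fun mc j => stepA start mc (PySem.List.pyGetD stockList j 0))
      (start, count + 1)).2) 0

-- ===== PORT B =====
-- the while-pop loop: drop stack entries whose value is ≤ v
def popLE (v : Int) : List (Int × Int) → List (Int × Int)
  | [] => []
  | (w, p) :: rest => if w ≤ v then popLE v rest else (w, p) :: rest

-- body of B's loop: state (total, stack, d), next value v (scanning from the right)
def stepB (s : Int × List (Int × Int) × Int) (v : Int) : Int × List (Int × Int) × Int :=
  let stk := popLE v s.2.1
  let tot := match stk with
    | (_, p) :: _ => s.1 + stk.length + s.2.2 - p
    | [] => s.1 + s.2.2 + 1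
  (tot, (v, s.2.2) :: stk, s.2.2 + 1)

def countMaxGroup_alt (stockList : List Int) : Int :=
  (stockList.reverse.foldl stepB (0, [], 0)).1

-- ===== PRECONDITION & SPEC =====
def Spec_countMaxGroup (stockList : List Int) (out : Int) : Prop := out = countMaxGroup_alt stockList
instance (stockList : List Int) (out : Int) : Decidable (Spec_countMaxGroup stockList out) := by unfold Spec_countMaxGroup; infer_instance

-- ===== CLAIM (what is proved, stated in full; the proofs are below) =====
def Claim_equal_countMaxGroup : Prop := ∀ (stockList : List Int), Dom_countMaxGroup stockList → Spec_countMaxGroup stockList (countMaxGroup stockList)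

-- ===== LEMMAS AND PROOFS =====

-- number of strict running-max records of l above initial max s
def chainRec (s : Int) : List Int → Int
  | [] => 0
  | x :: xs => if s < x then 1 + chainRec x xs else chainRec s xs

-- number of elements of l before its first element exceeding s
def beforeCnt (s : Int) : List Int → Int
  | [] => 0
  | x :: xs => if s < x then 0 else 1 + beforeCnt s xs

-- reference value: sum of per-start contributions over all suffixes
def specSum : List Int → Int
  | [] => 0
  | x :: xs => (1 + chainRec x xs + beforeCnt x xs) + specSum xs

-- the monotonic stack B maintains after having consumed the suffix l
def chainStk : List Int → List (Int × Int)
  | [] => []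
  | x :: xs => (x, (xs.length : Int)) :: popLE x (chainStk xs)

theorem popLE_popLE (x y : Int) (c : List (Int × Int)) (h : y ≤ x) :
    popLE x (popLE y c) = popLE x c := by
  induction c with
  | nil => rfl
  | cons a r ih =>
    obtain ⟨w, p⟩ := a
    by_cases hw : w ≤ y
    · simp [popLE, hw, hw.trans h, ih]
    · simp [popLE, hw]

theorem popLE_length (x : Int) (t : List Int) :
    ((popLE x (chainStk t)).length : Int) = chainRec x t := by
  induction t generalizing x with
  | nil => rfl
  | cons y u ih =>
    rw [chainStk]
    show ((popLE x ((y, (u.length : Int)) :: popLE y (chainStk u))).length : Int) = _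
    simp only [popLE]
    by_cases h : x < y
    · rw [if_neg (not_le.mpr h), chainRec, if_pos h, List.length_cons, ← ih y]
      push_cast; ring
    · rw [if_pos (not_lt.mp h), popLE_popLE x y _ (not_lt.mp h), ih, chainRec, if_neg h]

theorem popLE_head (x : Int) (t : List Int) :
    (∀ w p r, popLE x (chainStk t) = (w, p) :: r → (t.length : Int) - p - 1 = beforeCnt x t)
    ∧ (popLE x (chainStk t) = [] → (t.length : Int) = beforeCnt x t) := by
  induction t generalizing x with
  | nil => exact ⟨fun w p r h => by simp [chainStk, popLE] at h, fun _ => rfl⟩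
  | cons y u ih =>
    by_cases h : x < y
    · constructor
      · intro w p r hw
        rw [chainStk, popLE, if_neg (not_le.mpr h)] at hw
        injection hw with h1 h2
        injection h1 with hw1 hp1
        subst hp1
        simp [beforeCnt, h]
      · intro hw
        rw [chainStk, popLE, if_neg (not_le.mpr h)] at hw
        exact absurd hw (by simp)
    · have hle : y ≤ x := not_lt.mp h
      have hred : popLE x (chainStk (y :: u)) = popLE x (chainStk u) := by
        rw [chainStk, popLE, if_pos hle, popLE_popLE x y _ hle]
      constructor
      · intro w p r hw
        rw [hred] at hw
        have := (ih x).1 w p r hw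
        rw [beforeCnt, if_neg h, ← this, List.length_cons]
        push_cast; ring
      · intro hw
        rw [hred] at hw
        have := (ih x).2 hw
        rw [beforeCnt, if_neg h, ← this, List.length_cons]
        push_cast; ring

theorem foldr_stepB (l : List Int) :
    l.foldr (fun v s => stepB s v) (0, [], 0) = (specSum l, chainStk l, (l.length : Int)) := by
  induction l with
  | nil => rfl
  | cons x t ih =>
    rw [List.foldr_cons, ih]
    rw [stepB]
    rcases hs : popLE x (chainStk t) with _ | ⟨⟨w, p⟩, r⟩
    · have hb := (popLE_head x t).2 hs
      have hr : chainRec x t = 0 := by rw [← popLE_length, hs]; rfl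
      simp only [hs, specSum, chainStk, List.length_cons]
      refine Prod.ext ?_ (Prod.ext (by simp) ?_)
      · show specSum t + (t.length : Int) + 1 = 1 + chainRec x t + beforeCnt x t + specSum t
        rw [hr, ← hb]; ring
      · show (t.length : Int) + 1 = ((t.length + 1 : Nat) : Int)
        push_cast; ring
    · have hb := (popLE_head x t).1 w p r hs
      have hr : ((((w, p) :: r).length : Nat) : Int) = chainRec x t := by
        rw [← popLE_length, hs]
      simp only [hs, specSum, chainStk, List.length_cons]
      refine Prod.ext ?_ (Prod.ext (by simp) ?_)
      · show specSum t + (((w, p) :: r).length : Int) + (t.length : Int) - p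
            = 1 + chainRec x t + beforeCnt x t + specSum t
        rw [hr, ← hb]; ring
      · show (t.length : Int) + 1 = ((t.length + 1 : Nat) : Int)
        push_cast; ring

theorem alt_eq_specSum (xs : List Int) : countMaxGroup_alt xs = specSum xs := by
  rw [countMaxGroup_alt, List.foldl_reverse]
  rw [foldr_stepB xs]

theorem inner_ne (s : Int) (l : List Int) :
    ∀ m c, s < m → (l.foldl (stepA s) (m, c)).2 = c + chainRec m l := by
  induction l with
  | nil => intro m c _; simp [chainRec]
  | cons x t ih =>
    intro m c hm
    rw [List.foldl_cons, stepA]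
    by_cases hx : m < x
    · rw [if_pos hx, ih x (c + 1) (hm.trans hx), chainRec, if_pos hx]; ring
    · rw [if_neg hx, if_neg (ne_of_lt hm), ih m c hm, chainRec, if_neg hx]

theorem inner_eq (s : Int) (l : List Int) :
    ∀ c, (l.foldl (stepA s) (s, c)).2 = c + chainRec s l + beforeCnt s l := by
  induction l with
  | nil => intro c; simp [chainRec, beforeCnt]
  | cons x t ih =>
    intro c
    rw [List.foldl_cons, stepA]
    by_cases hx : s < x
    · rw [if_pos hx, inner_ne s t x (c + 1) hx, chainRec, if_pos hx, beforeCnt, if_pos hx]; ring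
    · rw [if_neg hx, if_pos rfl, ih (c + 1), chainRec, if_neg hx, beforeCnt, if_neg hx]; ring

theorem outerA (xs : List Int) :
    ∀ (l : List Int) (k : Nat) (c : Int), xs.drop k = l →
      (PySem.List.pyRange (k : Int) (xs.length : Int) 1).foldl (fun count i =>
        let start := PySem.List.pyGetD xs i 0
        ((PySem.List.pyRange (i + 1) (xs.length : Int) 1).foldl
          (fun mc j => stepA start mc (PySem.List.pyGetD xs j 0))
          (start, count + 1)).2) c = c + specSum l := by
  intro l
  induction l with
  | nil =>
    intro k c hd
    have hk : xs.length ≤ k := List.drop_eq_nil_iff.mp hd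
    rw [PySem.List.pyRange_one_eq_nil (by exact_mod_cast hk)]
    simp [specSum]
  | cons x t ih =>
    intro k c hd
    have hk : k < xs.length := by
      by_contra hge
      rw [List.drop_eq_nil_iff.mpr (not_lt.mp hge)] at hd
      exact absurd hd (by simp)
    have hx : xs.getD k 0 = x := by
      have h0 : xs[k]? = some x := by
        rw [← Nat.add_zero k, ← List.getElem?_drop, hd]; rfl
      simp [List.getD, h0]
    have ht : xs.drop (k + 1) = t := by
      have : xs.drop (k + 1) = (xs.drop k).drop 1 := by rw [List.drop_drop]
      rw [this, hd]; rfl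
    rw [PySem.List.pyRange_one_cons (by exact_mod_cast hk)]
    rw [List.foldl_cons]
    have hinner :
        ((PySem.List.pyRange ((k : Int) + 1) (xs.length : Int) 1).foldl
          (fun mc j => stepA (PySem.List.pyGetD xs (k : Int) 0) mc (PySem.List.pyGetD xs j 0))
          (PySem.List.pyGetD xs (k : Int) 0, c + 1)).2
          = c + 1 + chainRec x t + beforeCnt x t := by
      rw [PySem.List.foldl_pyRange_pyGetD' xs 0 _ _ (by positivity)]
      have htn : (((k : Int) + 1)).toNat = k + 1 := by omega
      rw [htn, ht]
      rw [PySem.List.pyGetD_natCast, hx]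
      exact inner_eq x t (c + 1)
    simp only [PySem.List.pyGetD_natCast, hx] at hinner ⊢
    rw [hinner]
    have := ih (k + 1) (c + 1 + chainRec x t + beforeCnt x t) ht
    push_cast at this ⊢
    rw [this, specSum]; ring

theorem a_eq_specSum (xs : List Int) : countMaxGroup xs = specSum xs := by
  have := outerA xs xs 0 0 (by rfl)
  rw [countMaxGroup]
  simpa using this

-- ===== VERDICT (by name: the statement is the Claim_ definition above) =====
theorem countMaxGroup_spec : Claim_equal_countMaxGroup := by
  intro xs _
  show countMaxGroup xs = countMaxGroup_alt xs
  rw [a_eq_specSum, alt_eq_specSum]
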